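-- pv_equiv track=rewrite | github.com/kelanbb/PythonNotes | v2/exam.py | q8
-- ===== SOURCE A (Python) =====
-- def q8(strng):
--     '''
--     Given a sentence as a string with words being separated by a single space,
--     return the length of the shortest word.
--     '''
--     short=99999
--     spl=strng.split(" ")
--     for i in spl:
--        if len(i) < short:
--           short = len(i)
--     return short
--     pass
--
--     '''
--     METHOD 2
--     return len(min(strng.split(), key=len)) # key len is let len be key to pull from this
--
--
--
--     '''
-- ===== SOURCE B (Python) =====
-- def q8(strng):
--     best = 99999
--     cur = 0
--     for ch in strng:
--         if ch == ' ':
--             best = min(best, cur)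
--             cur = 0
--         else:
--             cur += 1
--     return min(best, cur)
-- ===== Notes on version B (the rewrite author's own statement) =====
-- stated objective: alternative
-- what changed: Replaces split-into-word-list plus a minimum scan over the words by a single character pass that tracks the current word length and the running minimum, allocating no intermediate word list.
import Mathlib
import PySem

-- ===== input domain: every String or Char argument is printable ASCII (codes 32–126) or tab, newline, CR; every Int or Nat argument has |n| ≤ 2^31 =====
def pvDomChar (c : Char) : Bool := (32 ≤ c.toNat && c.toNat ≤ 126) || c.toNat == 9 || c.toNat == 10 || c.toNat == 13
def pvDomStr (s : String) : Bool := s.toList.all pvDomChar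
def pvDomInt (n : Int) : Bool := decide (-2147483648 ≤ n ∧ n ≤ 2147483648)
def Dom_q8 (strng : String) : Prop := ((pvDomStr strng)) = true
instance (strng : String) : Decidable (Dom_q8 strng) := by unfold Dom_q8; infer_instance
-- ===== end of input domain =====

-- B replaces split(" ") plus a scan over the word list by a single character pass tracking
-- the current word length and the running minimum (alternative decomposition, no word list).

-- ===== PORT A =====
-- words are kept as List Char; len(i) is i.length, split(" ") is Chars.splitOn (sep ≠ "")
def q8 (strng : String) : Int :=
  let short : Int := 99999
  let spl := PySem.Chars.splitOn strng.toList " ".toList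
  spl.foldl (fun short i => if (i.length : Int) < short then (i.length : Int) else short) short

-- ===== PORT B =====
def q8_alt (strng : String) : Int :=
  let p := strng.toList.foldl
    (fun (p : Int × Int) ch => if ch == ' ' then (min p.1 p.2, 0) else (p.1, p.2 + 1))
    (99999, 0)
  min p.1 p.2

-- ===== PRECONDITION & SPEC =====
def Spec_q8 (strng : String) (out : Int) : Prop := out = q8_alt strng
instance (strng : String) (out : Int) : Decidable (Spec_q8 strng out) := by unfold Spec_q8; infer_instance

-- ===== CLAIM (what is proved, stated in full; the proofs are below) =====
def Claim_equal_q8 : Prop := ∀ (strng : String), Dom_q8 strng → Spec_q8 strng (q8 strng)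

-- ===== LEMMAS AND PROOFS =====

-- B's step function
def pvStep (p : Int × Int) (ch : Char) : Int × Int :=
  if ch == ' ' then (min p.1 p.2, 0) else (p.1, p.2 + 1)

-- clean recursion for splitOn with single-space separator, carrying the current word (reversed)
def pvSplitAux : List Char → List Char → List (List Char)
  | [], cur => [cur.reverse]
  | c :: rest, cur => if c == ' ' then cur.reverse :: pvSplitAux rest [] else pvSplitAux rest (c :: cur)

lemma pvGo_eq (l : List Char) : ∀ (fuel : Nat) (cur : List Char) (acc : List (List Char)),
    l.length < fuel →
    PySem.Chars.splitOn.go [' '] fuel l cur acc = acc.reverse ++ pvSplitAux l cur := by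
  induction l with
  | nil =>
    intro fuel cur acc h
    match fuel with
    | fuel + 1 => simp [PySem.Chars.splitOn.go, pvSplitAux]
  | cons c rest ih =>
    intro fuel cur acc h
    match fuel with
    | fuel + 1 =>
      by_cases hc : c = ' '
      · subst hc
        rw [show PySem.Chars.splitOn.go [' '] (fuel+1) (' ' :: rest) cur acc
            = PySem.Chars.splitOn.go [' '] fuel rest [] (cur.reverse :: acc) by
          simp [PySem.Chars.splitOn.go, List.isPrefixOf]]
        rw [ih fuel [] (cur.reverse :: acc) (by simpa using Nat.lt_of_succ_lt_succ h)]
        simp [pvSplitAux]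
      · rw [show PySem.Chars.splitOn.go [' '] (fuel+1) (c :: rest) cur acc
            = PySem.Chars.splitOn.go [' '] fuel rest (c :: cur) acc by
          have h' : (' ' == c) = false := by simp [Ne.symm hc]
          simp [PySem.Chars.splitOn.go, List.isPrefixOf, h']]
        rw [ih fuel (c :: cur) acc (by simpa using Nat.lt_of_succ_lt_succ h)]
        simp [pvSplitAux, hc]

lemma pvSplitOn_eq (l : List Char) :
    PySem.Chars.splitOn l [' '] = pvSplitAux l [] := by
  have := pvGo_eq l (l.length + 1) [] [] (Nat.lt_succ_self _)
  simpa [PySem.Chars.splitOn] using this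

-- A's fold over the words produced from (l, cur) equals B's scan of l started at (best, cur.length)
lemma pvMain (l : List Char) : ∀ (cur : List Char) (best : Int),
    (pvSplitAux l cur).foldl
      (fun short i => if (i.length : Int) < short then (i.length : Int) else short) best
    = (let p := l.foldl pvStep (best, (cur.length : Int)); min p.1 p.2) := by
  induction l with
  | nil =>
    intro cur best
    simp only [pvSplitAux, List.foldl, List.length_reverse, min_def]
    split_ifs <;> omega
  | cons c rest ih =>
    intro cur best
    by_cases hc : c = ' '
    · subst hc
      have L : pvSplitAux (' ' :: rest) cur = cur.reverse :: pvSplitAux rest [] := by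
        simp [pvSplitAux]
      rw [L, List.foldl_cons, ih []]
      have hstate : (if ((cur.reverse.length : Int)) < best then ((cur.reverse.length : Int)) else best)
          = min best (cur.length : Int) := by
        rw [List.length_reverse, min_def]; split_ifs <;> omega
      rw [hstate]
      simp only [List.foldl_cons, pvStep, beq_self_eq_true, if_true, List.length_nil,
        Nat.cast_zero]
    · have L : pvSplitAux (c :: rest) cur = pvSplitAux rest (c :: cur) := by
        simp [pvSplitAux, hc]
      rw [L, ih (c :: cur)]
      have R : pvStep (best, (cur.length : Int)) c = (best, ((c :: cur).length : Int)) := by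
        simp [pvStep, hc]
      simp only [List.foldl_cons, R]

-- ===== VERDICT (by name: the statement is the Claim_ definition above) =====
theorem q8_spec : Claim_equal_q8 := by
  intro strng _
  unfold Spec_q8 q8 q8_alt
  have hsep : (" ".toList : List Char) = [' '] := rfl
  rw [hsep, pvSplitOn_eq]
  exact pvMain strng.toList [] 99999
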